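-- pv_equiv track=rewrite | github.com/saldigioia/wayback-archive-plugin | wayback-archive/scripts/bootstrap.py | _apex_of
-- ===== SOURCE A (Python) =====
-- _MULTIPART_TLDS = {
--     "co.uk", "co.jp", "co.nz", "co.za", "co.kr",
--     "com.au", "com.br", "com.mx", "com.cn", "com.sg", "com.hk", "com.tr",
--     "myshopify.com",  # treated as a pseudo-TLD: yeezygap.myshopify.com is an apex
-- }
--
-- def _apex_of(host: str) -> str:
--     """Return the registrable apex domain for a host.
--
--     kanyewest.com        -> kanyewest.com
--     www.kanyewest.com    -> kanyewest.com
--     shop.kanyewest.co.uk -> kanyewest.co.uk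
--     yeezygap.myshopify.com -> yeezygap.myshopify.com  (myshopify.com is a pseudo-TLD)
--     """
--     labels = host.split(".")
--     if len(labels) <= 2:
--         return host
--     for tld in _MULTIPART_TLDS:
--         if host.endswith("." + tld):
--             parts = tld.count(".") + 1  # number of label components in TLD
--             return ".".join(labels[-(parts + 1):])
--     return ".".join(labels[-2:])
-- ===== SOURCE B (Python) =====
-- _MULTIPART_TLDS = {
--     "co.uk", "co.jp", "co.nz", "co.za", "co.kr",
--     "com.au", "com.br", "com.mx", "com.cn", "com.sg", "com.hk", "com.tr",
--     "myshopify.com",  # treated as a pseudo-TLD: yeezygap.myshopify.com is an apex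
-- }
--
-- def _apex_of(host: str) -> str:
--     """Return the registrable apex domain for a host.
--
--     Instead of scanning the TLD set with endswith, build the two-label
--     suffix once and look it up directly (every multipart TLD in the set
--     has exactly two labels).
--     """
--     labels = host.split(".")
--     if len(labels) <= 2:
--         return host
--     cand = ".".join(labels[-2:])
--     return ".".join(labels[-3:]) if cand in _MULTIPART_TLDS else cand
-- ===== Notes on version B (the rewrite author's own statement) =====
-- stated objective: idiomatic
-- what changed: A scans the whole multipart-TLD set testing an endswith of each entry against the host; B joins the last two labels into the candidate suffix once and does a single set-membership lookup (valid because every TLD in the fixed set has exactly two labels), eliminating the per-TLD scan.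
import Mathlib
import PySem

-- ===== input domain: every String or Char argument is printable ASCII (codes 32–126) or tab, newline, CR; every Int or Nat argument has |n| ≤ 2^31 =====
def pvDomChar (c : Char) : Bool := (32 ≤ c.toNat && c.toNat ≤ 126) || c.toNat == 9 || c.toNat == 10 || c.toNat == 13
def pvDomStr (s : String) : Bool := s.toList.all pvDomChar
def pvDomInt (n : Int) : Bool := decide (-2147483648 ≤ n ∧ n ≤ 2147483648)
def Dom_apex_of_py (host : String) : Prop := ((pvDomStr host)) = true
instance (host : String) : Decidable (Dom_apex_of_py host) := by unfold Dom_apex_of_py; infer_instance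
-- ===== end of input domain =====

-- B replaces A's per-TLD endswith scan by building the two-label suffix once and
-- looking it up in the TLD set (objective: idiomatic/simpler single lookup).

-- ===== PORT A =====
-- the module constant _MULTIPART_TLDS (a Python set literal of 13 distinct strings)
def pvTlds : PySem.Set (List Char) :=
  PySem.Set.ofList
    ["co.uk".toList, "co.jp".toList, "co.nz".toList, "co.za".toList, "co.kr".toList,
     "com.au".toList, "com.br".toList, "com.mx".toList, "com.cn".toList, "com.sg".toList,
     "com.hk".toList, "com.tr".toList, "myshopify.com".toList]

-- A's for-loop with early return ('for tld in _MULTIPART_TLDS: if host.endswith("." + tld): …');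
-- the iteration order over the set is irrelevant here: at most one tld can match (proved below).
def apexLoop (hostL : List Char) (labels : List (List Char)) : List (List Char) → Option (List Char)
  | [] => none
  | tld :: rest =>
      if PySem.Chars.endswith hostL ('.' :: tld) then
        some (PySem.Chars.join ['.']
          (PySem.List.slice labels (some (-(((PySem.Chars.count tld ['.'] : Int) + 1) + 1))) none))
      else apexLoop hostL labels rest

def apex_of_py (host : String) : String :=
  let hostL := host.toList
  let labels := PySem.Chars.splitOn hostL ['.']
  if labels.length ≤ 2 then host
  else
    match apexLoop hostL labels pvTlds with
    | some r => String.ofList r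
    | none => String.ofList (PySem.Chars.join ['.'] (PySem.List.slice labels (some (-2)) none))

-- ===== PORT B =====
def apex_of_py_alt (host : String) : String :=
  let labels := PySem.Chars.splitOn host.toList ['.']
  if labels.length ≤ 2 then host
  else
    let cand := PySem.Chars.join ['.'] (PySem.List.slice labels (some (-2)) none)
    if PySem.Set.contains pvTlds cand then
      String.ofList (PySem.Chars.join ['.'] (PySem.List.slice labels (some (-3)) none))
    else
      String.ofList cand

-- ===== PRECONDITION & SPEC =====
def Spec_apex_of_py (host : String) (out : String) : Prop := out = apex_of_py_alt host
instance (host : String) (out : String) : Decidable (Spec_apex_of_py host out) := by unfold Spec_apex_of_py; infer_instance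

-- ===== CLAIM (what is proved, stated in full; the proofs are below) =====
def Claim_equal_apex_of_py : Prop := ∀ (host : String), Dom_apex_of_py host → Spec_apex_of_py host (apex_of_py host)

-- ===== LEMMAS AND PROOFS =====

-- functional spec of Python's str.split("."): (first label, remaining labels)
def pvSplit : List Char → List Char × List (List Char)
  | [] => ([], [])
  | c :: t =>
      let p := pvSplit t
      if c = '.' then ([], p.1 :: p.2) else (c :: p.1, p.2)

theorem pvSplitOn_go_eq (fuel : Nat) (l cur : List Char) (acc : List (List Char))
    (h : l.length < fuel) :
    PySem.Chars.splitOn.go ['.'] fuel l cur acc =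
      acc.reverse ++ (cur.reverse ++ (pvSplit l).1) :: (pvSplit l).2 := by
  induction fuel generalizing l cur acc with
  | zero => omega
  | succ f ih =>
    cases l with
    | nil =>
      rw [PySem.Chars.splitOn.go]
      simp [pvSplit]
      omega
    | cons c rest =>
      rw [PySem.Chars.splitOn.go]
      by_cases hc : c = '.'
      · subst hc
        have hp : List.isPrefixOf ['.'] ('.' :: rest) = true := by
          simp [List.isPrefixOf]
        rw [if_pos hp]
        simp only [List.length_singleton, List.drop_succ_cons, List.drop_zero]
        rw [ih rest [] ((List.reverse cur) :: acc) (by simp at h; omega)]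
        have hs : pvSplit ('.' :: rest) = ([], (pvSplit rest).1 :: (pvSplit rest).2) := by
          simp [pvSplit]
        rw [hs]
        simp
      · have hp : List.isPrefixOf ['.'] (c :: rest) = false := by
          simp [List.isPrefixOf]
          exact fun hcc => absurd hcc.symm hc
        rw [if_neg (by simp [hp])]
        rw [ih rest (c :: cur) acc (by simp at h ⊢; omega)]
        have hs : pvSplit (c :: rest) = (c :: (pvSplit rest).1, (pvSplit rest).2) := by
          simp [pvSplit, hc]
        rw [hs]
        simp

theorem pvSplitOn_eq (s : List Char) :
    PySem.Chars.splitOn s ['.'] = (pvSplit s).1 :: (pvSplit s).2 := by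
  have := pvSplitOn_go_eq (s.length + 1) s [] [] (by omega)
  simpa [PySem.Chars.splitOn] using this

theorem pvSplit_free (s : List Char) :
    '.' ∉ (pvSplit s).1 ∧ ∀ l ∈ (pvSplit s).2, '.' ∉ l := by
  induction s with
  | nil => simp [pvSplit]
  | cons c t ih =>
    by_cases hc : c = '.' <;> simp [pvSplit, hc]
    · exact ⟨ih.1, ih.2⟩
    · refine ⟨⟨fun h => hc h.symm, ih.1⟩, ih.2⟩

theorem pvSplit_join (s : List Char) :
    List.intercalate ['.'] ((pvSplit s).1 :: (pvSplit s).2) = s := by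
  induction s with
  | nil => simp [pvSplit, List.intercalate]
  | cons c t ih =>
    by_cases hc : c = '.'
    · subst hc
      have hs : pvSplit ('.' :: t) = ([], (pvSplit t).1 :: (pvSplit t).2) := by
        simp [pvSplit]
      rw [hs]
      rw [show List.intercalate ['.'] ([] :: (pvSplit t).1 :: (pvSplit t).2) =
            [] ++ '.' :: List.intercalate ['.'] ((pvSplit t).1 :: (pvSplit t).2) from by
        simp [List.intercalate, List.intersperse]]
      rw [ih]
      simp
    · have hs : pvSplit (c :: t) = (c :: (pvSplit t).1, (pvSplit t).2) := by
        simp [pvSplit, hc]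
      rw [hs]
      cases hr : (pvSplit t).2 with
      | nil =>
        rw [hr] at ih
        simp [List.intercalate] at ih ⊢
        rw [ih]
      | cons b rs =>
        rw [hr] at ih
        rw [show List.intercalate ['.'] ((c :: (pvSplit t).1) :: b :: rs) =
              c :: List.intercalate ['.'] ((pvSplit t).1 :: b :: rs) from by
          simp [List.intercalate, List.intersperse]]
        rw [ih]

-- uniqueness of the first '.'-split of a string
theorem pvUniq : ∀ (u1 u2 r1 r2 : List Char), '.' ∉ u1 → '.' ∉ u2 →
    u1 ++ '.' :: r1 = u2 ++ '.' :: r2 → u1 = u2 ∧ r1 = r2 := by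
  intro u1
  induction u1 with
  | nil =>
    intro u2 r1 r2 _ h2 h
    cases u2 with
    | nil => simpa using h
    | cons d u2' =>
      simp at h
      exact absurd (h.1 ▸ List.mem_cons_self) h2
  | cons c u1' ih =>
    intro u2 r1 r2 h1 h2 h
    cases u2 with
    | nil =>
      simp at h
      exact absurd (h.1 ▸ List.mem_cons_self) h1
    | cons d u2' =>
      simp at h
      obtain ⟨hcd, h'⟩ := h
      have := ih u2' r1 r2 (fun hm => h1 (List.mem_cons_of_mem _ hm)) (fun hm => h2 (List.mem_cons_of_mem _ hm)) h'
      exact ⟨by rw [hcd, this.1], this.2⟩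

theorem pvInterc_append (init rest : List (List Char)) (h1 : init ≠ []) (h2 : rest ≠ []) :
    List.intercalate ['.'] (init ++ rest) =
      List.intercalate ['.'] init ++ '.' :: List.intercalate ['.'] rest := by
  induction init with
  | nil => exact absurd rfl h1
  | cons a init' ih =>
    cases init' with
    | nil =>
      cases rest with
      | nil => exact absurd rfl h2
      | cons b rs => simp [List.intercalate, List.intersperse]
    | cons a2 init'' =>
      have ihh := ih (by simp)
      rw [show (a :: a2 :: init'') ++ rest = a :: ((a2 :: init'') ++ rest) from rfl]
      rw [show List.intercalate ['.'] (a :: ((a2 :: init'') ++ rest)) =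
            a ++ '.' :: List.intercalate ['.'] ((a2 :: init'') ++ rest) from by
        cases rest with
        | nil => exact absurd rfl h2
        | cons b rs => simp [List.intercalate, List.intersperse]]
      rw [ihh]
      rw [show List.intercalate ['.'] (a :: a2 :: init'') =
            a ++ '.' :: List.intercalate ['.'] (a2 :: init'') from by
        simp [List.intercalate, List.intersperse]]
      simp

theorem pvSuffix_iff (init : List (List Char)) (x y a b : List Char) (hinit : init ≠ [])
    (hx : '.' ∉ x) (hy : '.' ∉ y) (ha : '.' ∉ a) (hb : '.' ∉ b) :
    (('.' :: (a ++ '.' :: b)) <:+ List.intercalate ['.'] (init ++ [x, y])) ↔ (a = x ∧ b = y) := by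
  have hI : List.intercalate ['.'] (init ++ [x, y]) =
      List.intercalate ['.'] init ++ '.' :: (x ++ '.' :: y) := by
    rw [pvInterc_append init [x, y] hinit (by simp)]
    simp [List.intercalate, List.intersperse]
  constructor
  · rintro ⟨v, hv⟩
    rw [hI] at hv
    have hrev := congrArg List.reverse hv
    simp only [List.reverse_append, List.reverse_cons, List.append_assoc,
      List.cons_append, List.nil_append] at hrev
    obtain ⟨h1, h2⟩ := pvUniq _ _ _ _ (by simpa using hb) (by simpa using hy) hrev
    obtain ⟨h3, _⟩ := pvUniq _ _ _ _ (by simpa using ha) (by simpa using hx) h2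
    exact ⟨List.reverse_injective h3, List.reverse_injective h1⟩
  · rintro ⟨rfl, rfl⟩
    exact ⟨List.intercalate ['.'] init, by rw [hI]⟩

-- decidable statement that a concrete tld consists of exactly two '.'-free labels
def pvTwoParts (t : List Char) : Prop :=
  t = t.takeWhile (· ≠ '.') ++ '.' :: (t.dropWhile (· ≠ '.')).tail ∧
  '.' ∉ t.takeWhile (· ≠ '.') ∧ '.' ∉ (t.dropWhile (· ≠ '.')).tail

theorem pvLoop_eq (hostL : List Char) (labels : List (List Char)) (cand : List Char)
    (ts : List (List Char))
    (h : ∀ t ∈ ts, (PySem.Chars.endswith hostL ('.' :: t) = true ↔ cand = t) ∧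
                   PySem.Chars.count t ['.'] = 1) :
    apexLoop hostL labels ts =
      if ts.contains cand then
        some (PySem.Chars.join ['.'] (PySem.List.slice labels (some (-3)) none))
      else none := by
  induction ts with
  | nil => simp [apexLoop]
  | cons t rest ih =>
    have ht := h t List.mem_cons_self
    by_cases hc : cand = t
    · have he : PySem.Chars.endswith hostL ('.' :: t) = true := ht.1.mpr hc
      simp [apexLoop, he, ht.2, hc]
    · have he : PySem.Chars.endswith hostL ('.' :: t) = false := by
        cases hval : PySem.Chars.endswith hostL ('.' :: t)
        · rfl
        · exact absurd (ht.1.mp hval) hc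
      have := ih (fun t' ht' => h t' (List.mem_cons_of_mem _ ht'))
      simp only [apexLoop, he, Bool.false_eq_true, if_false, this]
      by_cases hm : cand ∈ rest <;> simp [hm, hc]

theorem pvDecomp (l : List (List Char)) (h : 3 ≤ l.length) :
    ∃ init x y, l = init ++ [x, y] ∧ init ≠ [] := by
  rcases hr : l.reverse with _ | ⟨y, rest1⟩
  · rw [List.reverse_eq_nil_iff] at hr; subst hr; simp at h
  rcases rest1 with _ | ⟨x, rest⟩
  · have h1 : l.length = 1 := by simpa using congrArg List.length hr
    omega
  refine ⟨rest.reverse, x, y, ?_, ?_⟩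
  · have hl : l = (y :: x :: rest).reverse := by rw [← hr, List.reverse_reverse]
    rw [hl]; simp
  · intro hn
    rw [List.reverse_eq_nil_iff] at hn
    have h1 : l.length = rest.length + 2 := by simpa using congrArg List.length hr
    subst hn
    simp at h1
    omega

theorem pvSliceLast2 (init : List (List Char)) (x y : List Char) :
    PySem.List.slice (init ++ [x, y]) (some (-2)) none = [x, y] := by
  have h1 : PySem.List.clampIdx (init ++ [x, y]).length (-2) = init.length := by
    simp [PySem.List.clampIdx]
  simp only [PySem.List.slice, h1]
  rw [List.drop_left]
  have h2 : (init ++ [x, y]).length - init.length = 2 := by simp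
  rw [h2]
  rfl

theorem pvHit (init : List (List Char)) (x y t : List Char) (hinit : init ≠ [])
    (hx : '.' ∉ x) (hy : '.' ∉ y) (ht2 : pvTwoParts t) :
    (PySem.Chars.endswith (List.intercalate ['.'] (init ++ [x, y])) ('.' :: t) = true ↔
      x ++ '.' :: y = t) := by
  obtain ⟨hts, hta, htb⟩ := ht2
  rw [PySem.Chars.endswith_iff]
  constructor
  · intro hsuf
    rw [hts] at hsuf
    have := (pvSuffix_iff init x y _ _ hinit hx hy hta htb).mp hsuf
    rw [hts, ← this.1, ← this.2]
  · intro hct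
    obtain ⟨hxa, hyb⟩ := pvUniq x _ y _ hx hta (hct.trans hts)
    have := (pvSuffix_iff init x y _ _ hinit hx hy hta htb).mpr ⟨hxa.symm, hyb.symm⟩
    rw [hts]
    exact this

theorem pvTlds_facts : ∀ t ∈ pvTlds, pvTwoParts t ∧ PySem.Chars.count t ['.'] = 1 := by
  simp only [pvTwoParts]
  decide

-- ===== VERDICT (by name: the statement is the Claim_ definition above) =====
theorem apex_of_py_spec : Claim_equal_apex_of_py := by
  intro host _
  unfold Spec_apex_of_py apex_of_py apex_of_py_alt
  by_cases hlen : (PySem.Chars.splitOn host.toList ['.']).length ≤ 2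
  · simp [hlen]
  · simp only [if_neg hlen]
    have hlen3 : 3 ≤ (PySem.Chars.splitOn host.toList ['.']).length := by omega
    obtain ⟨init, x, y, hdec, hinit⟩ := pvDecomp _ hlen3
    have hfree : ∀ l ∈ PySem.Chars.splitOn host.toList ['.'], '.' ∉ l := by
      rw [pvSplitOn_eq]
      intro l hml
      rcases List.mem_cons.mp hml with rfl | hm
      · exact (pvSplit_free host.toList).1
      · exact (pvSplit_free host.toList).2 l hm
    have hhost : host.toList = List.intercalate ['.'] (init ++ [x, y]) := by
      rw [← hdec, pvSplitOn_eq]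
      exact (pvSplit_join host.toList).symm
    have hx : '.' ∉ x := hfree x (by rw [hdec]; simp)
    have hy : '.' ∉ y := hfree y (by rw [hdec]; simp)
    have hcand : PySem.Chars.join ['.']
        (PySem.List.slice (PySem.Chars.splitOn host.toList ['.']) (some (-2)) none) =
        x ++ '.' :: y := by
      rw [hdec, pvSliceLast2]
      simp [PySem.Chars.join, List.intercalate, List.intersperse]
    have hloop := pvLoop_eq host.toList (PySem.Chars.splitOn host.toList ['.'])
        (PySem.Chars.join ['.']
          (PySem.List.slice (PySem.Chars.splitOn host.toList ['.']) (some (-2)) none))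
        pvTlds ?_
    · rw [hloop]
      cases hcon : List.contains pvTlds (PySem.Chars.join ['.']
          (PySem.List.slice (PySem.Chars.splitOn host.toList ['.']) (some (-2)) none)) with
      | true =>
        have hmem : PySem.Chars.join ['.']
            (PySem.List.slice (PySem.Chars.splitOn host.toList ['.']) (some (-2)) none) ∈
            pvTlds := by simpa using hcon
        simp [PySem.Set.contains, hmem]
      | false =>
        have hmem : PySem.Chars.join ['.']
            (PySem.List.slice (PySem.Chars.splitOn host.toList ['.']) (some (-2)) none) ∉
            pvTlds := by simpa using hcon
        simp [PySem.Set.contains, hmem]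
    · intro t ht
      obtain ⟨ht2, hcount⟩ := pvTlds_facts t ht
      refine ⟨?_, hcount⟩
      rw [hcand, hhost]
      exact pvHit init x y t hinit hx hy ht2
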